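-- pv_equiv track=rewrite | github.com/dywzju09-blip/cpg_generator_export | tools/verification/alias_analysis.py | _closure_limited
-- ===== SOURCE A (Python) =====
-- from typing import Dict, Iterable, List, Optional, Set, Tuple
--
-- def _closure_limited(graph: Dict[str, Set[str]], seed: str, max_depth: int) -> Set[str]:
--     if max_depth <= 0:
--         return set()
--     out: Set[str] = set()
--     frontier = {seed}
--     visited = {seed}
--     depth = 0
--     while frontier and depth < max_depth:
--         nxt: Set[str] = set()
--         for node in frontier:
--             for nei in graph.get(node, set()):
--                 if nei in visited:
--                     continue
--                 visited.add(nei)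
--                 out.add(nei)
--                 nxt.add(nei)
--         frontier = nxt
--         depth += 1
--     return out
-- ===== SOURCE B (Python) =====
-- def _closure_limited(graph, seed, max_depth):
--     # Naive (whole-set) fixed-point iteration: each round recomputes the one-step
--     # image of the entire reachable set; no frontier/visited bookkeeping.
--     reach = {seed}
--     for _ in range(max_depth):
--         new = set()
--         for node in reach:
--             for nei in graph.get(node, set()):
--                 if nei not in reach:
--                     new.add(nei)
--         if not new:
--             break
--         reach |= new
--     return reach - {seed}
-- ===== Notes on version B (the rewrite author's own statement) =====
-- stated objective: alternative
-- what changed: Replaced the frontier-based BFS (frontier/visited/out sets, expanding only the newest layer) by naive fixed-point iteration: each round recomputes the one-step successor image of the ENTIRE reachable set and unions it in, stopping at a fixed point or after max_depth rounds; frontier, visited and out disappear and the result is reach - {seed}.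
import Mathlib
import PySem

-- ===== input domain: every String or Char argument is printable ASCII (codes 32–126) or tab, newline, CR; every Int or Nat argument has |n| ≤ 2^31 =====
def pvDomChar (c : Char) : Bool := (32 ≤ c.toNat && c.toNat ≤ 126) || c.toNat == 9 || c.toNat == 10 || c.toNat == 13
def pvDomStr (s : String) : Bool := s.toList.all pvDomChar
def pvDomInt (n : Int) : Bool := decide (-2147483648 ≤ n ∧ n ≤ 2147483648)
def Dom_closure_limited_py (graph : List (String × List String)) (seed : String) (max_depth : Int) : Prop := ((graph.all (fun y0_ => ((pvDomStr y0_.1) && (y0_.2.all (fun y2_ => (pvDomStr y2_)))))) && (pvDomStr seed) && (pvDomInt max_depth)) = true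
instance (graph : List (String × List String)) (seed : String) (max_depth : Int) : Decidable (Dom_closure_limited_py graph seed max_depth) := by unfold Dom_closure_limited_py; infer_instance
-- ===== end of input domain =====

-- B replaces A's frontier-based BFS (frontier/visited/out sets, expanding only the newest
-- layer) by naive fixed-point iteration: each round recomputes the one-step image of the
-- ENTIRE reachable set and unions it in (objective: alternative, same result, not faster).
-- Both ports read Python sets as insertion-ordered duplicate-free lists (set outputs are
-- compared as finite sets).

-- ===== PORT A =====
-- graph.get(node, set())
def pvNbrs (graph : List (String × List String)) (node : String) : List String :=
  PySem.Dict.getD (PySem.Dict.mk graph) node []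

-- A's inner 'for nei in graph.get(node, set())' loop (state: visited, out, nxt)
def pvStepA (visited out nxt : List String) : List String → List String × List String × List String
  | [] => (visited, out, nxt)
  | nei :: rest =>
    if nei ∈ visited then pvStepA visited out nxt rest
    else pvStepA (visited ++ [nei]) (out ++ [nei]) (nxt ++ [nei]) rest

-- A's 'for node in frontier' loop
def pvLayerA (graph : List (String × List String)) :
    List String → List String → List String → List String →
    List String × List String × List String
  | [], v, o, nxt => (v, o, nxt)
  | node :: f, v, o, nxt =>
    let r := pvStepA v o nxt (pvNbrs graph node)
    pvLayerA graph f r.1 r.2.1 r.2.2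

-- A's 'while frontier and depth < max_depth' loop; the Nat argument is max_depth - depth
def pvLoopA (graph : List (String × List String)) :
    Nat → List String → List String → List String → List String
  | 0, _, _, o => o
  | n + 1, f, v, o =>
    if f.isEmpty then o
    else
      let r := pvLayerA graph f v o []
      pvLoopA graph n r.2.2 r.1 r.2.1

def closure_limited_py (graph : List (String × List String)) (seed : String) (max_depth : Int) : List String :=
  if max_depth ≤ 0 then []
  else pvLoopA graph max_depth.toNat [seed] [seed] []

-- ===== PORT B =====
-- B's inner 'for nei in graph.get(node, set())' loop: 'if nei not in reach: new.add(nei)'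
def pvInner (reach new : List String) : List String → List String
  | [] => new
  | nei :: rest =>
    if nei ∈ reach then pvInner reach new rest
    else pvInner reach (PySem.Set.add new nei) rest

-- B's 'for node in reach' loop building the round's new set
def pvScanB (graph : List (String × List String)) (reach : List String) :
    List String → List String → List String
  | new, [] => new
  | new, node :: rest => pvScanB graph reach (pvInner reach new (pvNbrs graph node)) rest

-- B's 'for _ in range(max_depth)' loop with the 'if not new: break'; 'reach |= new' is
-- ported as 'reach ++ new', exact here because new is built disjoint from reach
def pvLoopC (graph : List (String × List String)) : Nat → List String → List String
  | 0, reach => reach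
  | n + 1, reach =>
    let new := pvScanB graph reach [] reach
    if new = [] then reach else pvLoopC graph n (reach ++ new)

def closure_limited_py_alt (graph : List (String × List String)) (seed : String) (max_depth : Int) : List String :=
  PySem.Set.diff (pvLoopC graph max_depth.toNat [seed]) [seed]

-- ===== PRECONDITION & SPEC =====
def Spec_closure_limited_py (graph : List (String × List String)) (seed : String) (max_depth : Int) (out : List String) : Prop := out = closure_limited_py_alt graph seed max_depth
instance (graph : List (String × List String)) (seed : String) (max_depth : Int) (out : List String) : Decidable (Spec_closure_limited_py graph seed max_depth out) := by unfold Spec_closure_limited_py; infer_instance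

-- ===== CLAIM (what is proved, stated in full; the proofs are below) =====
def Claim_equal_closure_limited_py : Prop := ∀ (graph : List (String × List String)) (seed : String) (max_depth : Int), Dom_closure_limited_py graph seed max_depth → Spec_closure_limited_py graph seed max_depth (closure_limited_py graph seed max_depth)

-- ===== LEMMAS AND PROOFS =====

-- the list of neighbours newly visited by a scan that dedups against a growing v
def pvNew (v : List String) : List String → List String
  | [] => []
  | nei :: rest => if nei ∈ v then pvNew v rest else nei :: pvNew (v ++ [nei]) rest

-- the new elements one whole layer f contributes, starting from visited set v
def pvNewL (graph : List (String × List String)) : List String → List String → List String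
  | _, [] => []
  | v, node :: f =>
    let d := pvNew v (pvNbrs graph node)
    d ++ pvNewL graph (v ++ d) f

theorem pvStepA_eq (nbrs v o nxt : List String) :
    pvStepA v o nxt nbrs = (v ++ pvNew v nbrs, o ++ pvNew v nbrs, nxt ++ pvNew v nbrs) := by
  induction nbrs generalizing v o nxt with
  | nil => simp [pvStepA, pvNew]
  | cons nei rest ih =>
    by_cases h : nei ∈ v <;> simp [pvStepA, pvNew, h, ih]

theorem pvNew_not_mem (nbrs v : List String) : ∀ x ∈ pvNew v nbrs, x ∉ v := by
  induction nbrs generalizing v with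
  | nil => simp [pvNew]
  | cons nei rest ih =>
    by_cases h : nei ∈ v
    · simpa [pvNew, h] using ih v
    · intro x hx
      rw [pvNew, if_neg h] at hx
      rcases List.mem_cons.mp hx with rfl | hx
      · exact h
      · exact fun hv => ih (v ++ [nei]) x hx (by simp [hv])

theorem pvNew_nil_of_subset (nbrs v : List String) (h : ∀ x ∈ nbrs, x ∈ v) :
    pvNew v nbrs = [] := by
  induction nbrs with
  | nil => rfl
  | cons nei rest ih =>
    rw [pvNew, if_pos (h nei (by simp))]
    exact ih fun x hx => h x (by simp [hx])

theorem pvNew_cover (nbrs v : List String) : ∀ x ∈ nbrs, x ∈ v ++ pvNew v nbrs := by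
  induction nbrs generalizing v with
  | nil => simp
  | cons nei rest ih =>
    intro x hx
    by_cases h : nei ∈ v
    · rw [pvNew, if_pos h]
      rcases List.mem_cons.mp hx with rfl | hx
      · simp [h]
      · exact ih v x hx
    · rw [pvNew, if_neg h]
      rcases List.mem_cons.mp hx with rfl | hx
      · simp
      · have := ih (v ++ [nei]) x hx
        simpa [List.append_assoc] using this
-- pvNewL versions
theorem pvNewL_not_mem (graph : List (String × List String)) (f : List String) :
    ∀ (v : List String), ∀ x ∈ pvNewL graph v f, x ∉ v := by
  induction f with
  | nil => simp [pvNewL]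
  | cons node f ih =>
    intro v x hx
    rw [pvNewL] at hx
    rcases List.mem_append.mp hx with hx | hx
    · exact pvNew_not_mem _ v x hx
    · exact fun hv => ih (v ++ pvNew v (pvNbrs graph node)) x hx (by simp [hv])

theorem pvNewL_cover (graph : List (String × List String)) (f : List String) :
    ∀ (v : List String), ∀ node ∈ f, ∀ y ∈ pvNbrs graph node, y ∈ v ++ pvNewL graph v f := by
  induction f with
  | nil => simp
  | cons node f ih =>
    intro v nd hnd y hy
    rw [pvNewL]
    rcases List.mem_cons.mp hnd with rfl | hnd
    · have := pvNew_cover (pvNbrs graph nd) v y hy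
      rcases List.mem_append.mp this with h | h
      · simp [h]
      · simp [h]
    · have := ih (v ++ pvNew v (pvNbrs graph node)) nd hnd y hy
      simpa [List.append_assoc] using this

theorem pvLayerA_eq (graph : List (String × List String)) (f : List String) :
    ∀ (v o nxt : List String),
      pvLayerA graph f v o nxt =
        (v ++ pvNewL graph v f, o ++ pvNewL graph v f, nxt ++ pvNewL graph v f) := by
  induction f with
  | nil => simp [pvLayerA, pvNewL]
  | cons node f ih =>
    intro v o nxt
    rw [pvLayerA, pvStepA_eq]
    simp only [pvNewL, ih, List.append_assoc]

theorem pvInner_eq (nbrs reach acc : List String) :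
    pvInner reach acc nbrs = acc ++ pvNew (reach ++ acc) nbrs := by
  induction nbrs generalizing acc with
  | nil => simp [pvInner, pvNew]
  | cons nei rest ih =>
    by_cases h : nei ∈ reach
    · simp [pvInner, pvNew, h, ih]
    · by_cases h2 : nei ∈ acc
      · simp [pvInner, pvNew, PySem.Set.add, PySem.Set.contains, h, h2, ih]
      · have hm : nei ∉ reach ++ acc := by simp [h, h2]
        rw [pvInner, if_neg h, pvNew, if_neg hm]
        rw [show PySem.Set.add acc nei = acc ++ [nei] by
          simp [PySem.Set.add, PySem.Set.contains, h2]]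
        rw [ih]
        simp [List.append_assoc]

theorem pvScanB_eq (graph : List (String × List String)) (reach : List String)
    (f : List String) : ∀ (acc : List String),
    pvScanB graph reach acc f = acc ++ pvNewL graph (reach ++ acc) f := by
  induction f with
  | nil => simp [pvScanB, pvNewL]
  | cons node f ih =>
    intro acc
    rw [pvScanB, pvInner_eq, ih]
    simp only [pvNewL, List.append_assoc]

-- scanning the closed prefix p contributes nothing to the round
theorem pvScanB_closed (graph : List (String × List String)) (reach : List String)
    (p : List String) (hp : ∀ x ∈ p, ∀ y ∈ pvNbrs graph x, y ∈ reach) (f : List String) :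
    pvScanB graph reach [] (p ++ f) = pvScanB graph reach [] f := by
  induction p with
  | nil => rfl
  | cons node p ih =>
    rw [List.cons_append, pvScanB, pvInner_eq]
    rw [pvNew_nil_of_subset _ _ (by
      intro y hy
      have := hp node (by simp) y hy
      simpa using this)]
    exact ih fun x hx => hp x (by simp [hx])

theorem pvRound_eq (graph : List (String × List String)) (p f : List String)
    (hp : ∀ x ∈ p, ∀ y ∈ pvNbrs graph x, y ∈ p ++ f) :
    pvScanB graph (p ++ f) [] (p ++ f) = pvNewL graph (p ++ f) f := by
  rw [pvScanB_closed graph (p ++ f) p hp f, pvScanB_eq]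
  simp

theorem pvLoopA_nil (graph : List (String × List String)) (n : Nat) (v o : List String) :
    pvLoopA graph n [] v o = o := by
  cases n <;> simp [pvLoopA]

theorem pvLoopA_stall (graph : List (String × List String)) (n : Nat) (f v o : List String)
    (h : pvNewL graph v f = []) : pvLoopA graph n f v o = o := by
  cases n with
  | zero => rfl
  | succ n =>
    by_cases hf : f = []
    · simp [pvLoopA, hf]
    · rw [pvLoopA, if_neg (by simpa [List.isEmpty_iff] using hf), pvLayerA_eq]
      simp only [h, List.append_nil]
      exact pvLoopA_nil graph n v o

-- main loop correspondence: both loops append the same tail d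
theorem pvMain (graph : List (String × List String)) :
    ∀ (n : Nat) (p f o : List String),
      (∀ x ∈ p, ∀ y ∈ pvNbrs graph x, y ∈ p ++ f) →
      ∃ d, pvLoopC graph n (p ++ f) = (p ++ f) ++ d ∧
           pvLoopA graph n f (p ++ f) o = o ++ d ∧
           ∀ x ∈ d, x ∉ p ++ f := by
  intro n
  induction n with
  | zero => intro p f o _; exact ⟨[], by simp [pvLoopC, pvLoopA]⟩
  | succ n ih =>
    intro p f o hp
    set reach := p ++ f with hre
    by_cases hnew : pvNewL graph reach f = []
    · refine ⟨[], ?_, by simpa using pvLoopA_stall graph (n + 1) f reach o hnew, by simp⟩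
      rw [pvLoopC, pvRound_eq graph p f hp, if_pos hnew]
      simp
    · have hround : pvScanB graph reach [] reach = pvNewL graph reach f :=
        pvRound_eq graph p f hp
      set new := pvNewL graph reach f with hnd
      have hclosed : ∀ x ∈ reach, ∀ y ∈ pvNbrs graph x, y ∈ reach ++ new := by
        intro x hx y hy
        rcases List.mem_append.mp hx with hx | hx
        · exact List.mem_append.mpr (Or.inl (hp x hx y hy))
        · exact pvNewL_cover graph f reach x hx y hy
      obtain ⟨d, hC, hA, hd⟩ := ih reach new (o ++ new) hclosed
      refine ⟨new ++ d, ?_, ?_, ?_⟩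
      · rw [pvLoopC, hround, if_neg hnew]
        simpa [List.append_assoc] using hC
      · have hfne : ¬ f.isEmpty = true := by
          intro hfe
          have hf0 : f = [] := by simpa using hfe
          exact hnew (by rw [hnd, hf0]; rfl)
        rw [pvLoopA, if_neg hfne, pvLayerA_eq]
        simpa [List.append_assoc] using hA
      · intro x hx
        rcases List.mem_append.mp hx with hx | hx
        · exact pvNewL_not_mem graph f reach x hx
        · exact fun hr => hd x hx (by simp [hr])

-- ===== VERDICT (by name: the statement is the Claim_ definition above) =====
theorem closure_limited_py_spec : Claim_equal_closure_limited_py := by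
  intro graph seed md _
  show closure_limited_py graph seed md = closure_limited_py_alt graph seed md
  rw [closure_limited_py, closure_limited_py_alt]
  by_cases h : md ≤ 0
  · rw [if_pos h]
    have h0 : md.toNat = 0 := by omega
    simp [h0, pvLoopC, PySem.Set.diff, PySem.Set.contains]
  · rw [if_neg h]
    obtain ⟨d, hC, hA, hd⟩ := pvMain graph md.toNat [] [seed] []
      (by intro x hx; simp at hx)
    simp only [List.nil_append] at hC hA hd
    rw [hA, hC]
    have : ∀ x ∈ d, x ≠ seed := by
      intro x hx he
      exact hd x hx (by simp [he])
    simp only [PySem.Set.diff, PySem.Set.contains, List.filter_append]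
    rw [(List.filter_eq_self (l := d)).mpr (fun a ha => by simp [this a ha])]
    simp
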